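-- pv_equiv track=rewrite | github.com/harshnative/compitive-Q-A | python/recursion/fabonacci.py | findSeries
-- ===== SOURCE A (Python) =====
-- def fabo(num):
--     if(num <= 1):
--         return num
--     else:
--         return fabo(num-1) + fabo(num-2)
--
-- def findSeries(tillNum , sperator = " "):
--
--     result = ""
--
--     # no fabo for negative nums
--     if(tillNum < 0):
--         raise ValueError("num passed cannot be negative")
--
--     # adding the summed numbers to result
--     for i in range(tillNum):
--         result = result + str(fabo(i)) + sperator
--
--     # removing the last substractor added
--     result = result[:(len(sperator) * -1)]
--
--     return result
-- ===== SOURCE B (Python) =====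
-- def findSeries(tillNum, sperator=" "):
--     if tillNum < 0:
--         raise ValueError("num passed cannot be negative")
--     nums = []
--     a, b = 0, 1
--     for _ in range(tillNum):
--         nums.append(str(a))
--         a, b = b, a + b
--     return sperator.join(nums)
-- ===== Notes on version B (the rewrite author's own statement) =====
-- stated objective: faster
-- what changed: Replaces the exponential double recursion fabo(i) recomputed for each i by one iterative pass keeping the running Fibonacci pair, collects the strings in a list and joins them with the separator instead of appending and slicing off the trailing separator; intended as asymptotically faster (a timing run measured B 8086x at n=256 but A timed out on most inputs there, so a timing run could not confirm the label).
-- intended difference: With an empty separator and tillNum >= 1, A's trailing slice result[:-0] is result[:0] and A returns '' instead of the series; B returns the joined digits, which is what the function intends. — e.g. on findSeries(2, ""): A returns "", B returns "01"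
import Mathlib
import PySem

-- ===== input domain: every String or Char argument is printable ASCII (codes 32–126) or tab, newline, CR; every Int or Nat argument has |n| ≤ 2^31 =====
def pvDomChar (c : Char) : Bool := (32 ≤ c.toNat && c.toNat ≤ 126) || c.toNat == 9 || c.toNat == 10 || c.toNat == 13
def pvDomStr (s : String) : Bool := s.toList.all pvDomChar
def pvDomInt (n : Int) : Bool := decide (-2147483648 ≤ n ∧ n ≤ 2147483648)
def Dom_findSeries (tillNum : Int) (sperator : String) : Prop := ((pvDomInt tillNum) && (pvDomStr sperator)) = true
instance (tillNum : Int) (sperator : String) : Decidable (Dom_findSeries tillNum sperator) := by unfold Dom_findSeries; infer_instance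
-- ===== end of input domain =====

-- B replaces A's exponential per-element double recursion by one iterative pass with a
-- running Fibonacci pair and a join; intended as faster (measured 8086x at n=256, where A
-- timed out on most inputs, so a timing run could not confirm the label).


-- ===== PORT A =====
def fabo (num : Int) : Int :=
  if num ≤ 1 then num
  else fabo (num - 1) + fabo (num - 2)
termination_by num.toNat
decreasing_by all_goals omega

def findSeries (tillNum : Int) (sperator : String) : String :=
  let result : String :=
    (PySem.List.pyRange 0 tillNum 1).foldl
      (fun result i => result ++ PySem.Int.toStr (fabo i) ++ sperator) ""
  -- result[:(len(sperator) * -1)]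
  PySem.Str.slice result none (some (PySem.Str.len sperator * -1))

-- ===== PORT B =====
def findSeries_alt (tillNum : Int) (sperator : String) : String :=
  let st : List String × Int × Int :=
    (PySem.List.pyRange 0 tillNum 1).foldl
      (fun st _ => (st.1 ++ [PySem.Int.toStr st.2.1], st.2.2, st.2.1 + st.2.2))
      ([], 0, 1)
  PySem.Str.join sperator st.1

-- ===== PRECONDITION & SPEC =====
-- Pre_ excludes exactly tillNum < 0, where A raises ValueError.
def Pre_findSeries (tillNum : Int) (sperator : String) : Prop := 0 ≤ tillNum
instance (tillNum : Int) (sperator : String) : Decidable (Pre_findSeries tillNum sperator) := by unfold Pre_findSeries; infer_instance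
def pvWitness_findSeries : Int × String := (5, " ")

-- With an empty separator and tillNum ≥ 1, A's trailing slice result[:-0] is result[:0] and A
-- returns "" instead of the series; B returns the joined digits, which is what the function intends.
def D_findSeries (tillNum : Int) (sperator : String) : Prop := sperator = "" ∧ 1 ≤ tillNum
instance (tillNum : Int) (sperator : String) : Decidable (D_findSeries tillNum sperator) := by unfold D_findSeries; infer_instance

def Spec_findSeries (tillNum : Int) (sperator : String) (out : String) : Prop :=
  ¬ D_findSeries tillNum sperator → out = findSeries_alt tillNum sperator
instance (tillNum : Int) (sperator : String) (out : String) : Decidable (Spec_findSeries tillNum sperator out) := by unfold Spec_findSeries; infer_instance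

def pvDiffWitness_findSeries : Int × String := (2, "")
def pvDiffWitnessOut_findSeries : String × String := ("", "01")

-- ===== CLAIM (what is proved, stated in full; the proofs are below) =====
def Claim_unchanged_findSeries : Prop := ∀ (tillNum : Int) (sperator : String), Dom_findSeries tillNum sperator → Pre_findSeries tillNum sperator → Spec_findSeries tillNum sperator (findSeries tillNum sperator)
def Claim_changed_findSeries : Prop := Dom_findSeries (pvDiffWitness_findSeries.1) (pvDiffWitness_findSeries.2) ∧ Pre_findSeries (pvDiffWitness_findSeries.1) (pvDiffWitness_findSeries.2) ∧ D_findSeries (pvDiffWitness_findSeries.1) (pvDiffWitness_findSeries.2) ∧ findSeries (pvDiffWitness_findSeries.1) (pvDiffWitness_findSeries.2) = pvDiffWitnessOut_findSeries.1 ∧ findSeries_alt (pvDiffWitness_findSeries.1) (pvDiffWitness_findSeries.2) = pvDiffWitnessOut_findSeries.2 ∧ pvDiffWitnessOut_findSeries.1 ≠ pvDiffWitnessOut_findSeries.2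
def Claim_exact_findSeries : Prop := ∀ (tillNum : Int) (sperator : String), Dom_findSeries tillNum sperator → Pre_findSeries tillNum sperator → D_findSeries tillNum sperator → findSeries tillNum sperator ≠ findSeries_alt tillNum sperator

-- ===== LEMMAS AND PROOFS =====
-- iterative Fibonacci pair (the invariant of B's loop)
def pvF : Nat → Int × Int
  | 0 => (0, 1)
  | n+1 => ((pvF n).2, (pvF n).1 + (pvF n).2)

theorem pvFabo_eq (n : Nat) :
    fabo (n : Int) = (pvF n).1 ∧ fabo ((n : Int) + 1) = (pvF (n+1)).1 := by
  induction n with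
  | zero =>
    constructor
    · rw [fabo]; norm_num [pvF]
    · rw [fabo]; norm_num [pvF]
  | succ n ih =>
    refine ⟨by exact_mod_cast ih.2, ?_⟩
    rw [fabo]
    have h2 : ¬ (((n+1 : Nat) : Int) + 1 ≤ 1) := by push_cast; omega
    rw [if_neg h2]
    have e1 : ((n+1 : Nat) : Int) + 1 - 1 = ((n : Int) + 1) := by push_cast; ring
    have e2 : ((n+1 : Nat) : Int) + 1 - 2 = (n : Int) := by push_cast; ring
    rw [e1, e2, ih.1, ih.2]
    simp [pvF]; ring

theorem pvB_fold (n : Nat) :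
    (List.range n).foldl
      (fun (st : List String × Int × Int) (_ : Nat) =>
        (st.1 ++ [PySem.Int.toStr st.2.1], st.2.2, st.2.1 + st.2.2)) ([], 0, 1)
      = (((List.range n).map (fun k => PySem.Int.toStr (pvF k).1)), pvF n) := by
  induction n with
  | zero => rfl
  | succ n ih =>
    rw [List.range_succ, List.foldl_append, ih, List.map_append]
    simp [pvF]

theorem pvA_fold (sep : String) (n : Nat) (acc : String) :
    ((List.range n).foldl
        (fun (r : String) (k : Nat) => r ++ PySem.Int.toStr (fabo (0 + (k : Int))) ++ sep) acc).toList
      = acc.toList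
        ++ (((List.range n).map (fun k => (PySem.Int.toStr (pvF k).1).toList ++ sep.toList)).flatten) := by
  induction n generalizing acc with
  | zero => simp
  | succ n ih =>
    rw [List.range_succ, List.foldl_append, List.map_append, List.flatten_append]
    simp only [List.foldl_cons, List.foldl_nil, String.toList_append, ih]
    simp [(pvFabo_eq n).1, List.append_assoc]

theorem pvJoin_flatten (sL : List Char) (l : List (List Char)) (h : l ≠ []) :
    PySem.Chars.join sL l ++ sL = (l.map (fun p => p ++ sL)).flatten := by
  induction l with
  | nil => exact absurd rfl h
  | cons x t ih =>
    cases t with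
    | nil => simp [PySem.Chars.join_singleton]
    | cons y t' =>
      rw [PySem.Chars.join_cons_cons]
      simp only [List.map_cons, List.flatten_cons]
      rw [List.append_assoc, List.append_assoc, ih (by simp)]
      simp [List.append_assoc]

theorem pvAlt_toList (sperator : String) (n : Nat) :
    (findSeries_alt (n : Int) sperator).toList
      = PySem.Chars.join sperator.toList
          ((List.range n).map (fun k => (PySem.Int.toStr (pvF k).1).toList)) := by
  unfold findSeries_alt
  rw [PySem.List.pyRange_one]
  simp only [sub_zero, Int.toNat_natCast, List.foldl_map]
  rw [pvB_fold n]
  rw [PySem.Str.toList_join, List.map_map]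
  rfl

theorem pvA_toList (sperator : String) (n : Nat) :
    (findSeries (n : Int) sperator).toList
      = PySem.Chars.slice
          (((List.range n).map (fun k => (PySem.Int.toStr (pvF k).1).toList ++ sperator.toList)).flatten)
          none (some (PySem.Str.len sperator * -1)) := by
  unfold findSeries
  rw [PySem.Str.toList_slice]
  congr 1
  rw [PySem.List.pyRange_one]
  simp only [sub_zero, Int.toNat_natCast, List.foldl_map]
  have := pvA_fold sperator n ""
  simpa using this

theorem findSeries_agree (tillNum : Int) (sperator : String)
    (hpre : 0 ≤ tillNum) (hnd : ¬ D_findSeries tillNum sperator) :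
    findSeries tillNum sperator = findSeries_alt tillNum sperator := by
  obtain ⟨n, rfl⟩ : ∃ n : Nat, tillNum = (n : Int) :=
    ⟨tillNum.toNat, (Int.toNat_of_nonneg hpre).symm⟩
  apply String.toList_inj.mp
  rw [pvA_toList, pvAlt_toList]
  by_cases hsep : sperator = ""
  · have hn0 : n = 0 := by
      by_contra hne
      exact hnd ⟨hsep, by omega⟩
    subst hn0 hsep
    simp [PySem.Chars.join_nil, PySem.Str.len_eq, PySem.List.slice]
  · have hk : 0 < sperator.toList.length := by
      cases h : sperator.toList with
      | nil => exact absurd (String.toList_inj.mp (by simp [h])) hsep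
      | cons a t => simp
    have hlen : PySem.Str.len sperator * -1 = -((sperator.toList.length : Nat) : Int) := by
      rw [PySem.Str.len_eq]; ring
    rw [hlen]
    simp only [PySem.Chars.slice_eq_listSlice]
    rw [PySem.List.slice_to_neg_natCast _ _ hk]
    cases n with
    | zero => simp [PySem.Chars.join_nil]
    | succ m =>
      have hLne : (List.range (m+1)).map (fun k => (PySem.Int.toStr (pvF k).1).toList) ≠ [] := by
        simp
      have hflat : ((List.range (m+1)).map
            (fun k => (PySem.Int.toStr (pvF k).1).toList ++ sperator.toList)).flatten
          = PySem.Chars.join sperator.toList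
              ((List.range (m+1)).map (fun k => (PySem.Int.toStr (pvF k).1).toList))
            ++ sperator.toList := by
        rw [pvJoin_flatten _ _ hLne, List.map_map]
        simp [Function.comp_def]
      rw [hflat, List.length_append, Nat.add_sub_cancel, List.take_left]

theorem findSeries_diff (tillNum : Int) (sperator : String)
    (hd : D_findSeries tillNum sperator) :
    findSeries tillNum sperator ≠ findSeries_alt tillNum sperator := by
  obtain ⟨hsep, ht⟩ := hd
  obtain ⟨n, rfl⟩ : ∃ n : Nat, tillNum = (n : Int) :=
    ⟨tillNum.toNat, (Int.toNat_of_nonneg (by omega)).symm⟩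
  obtain ⟨m, rfl⟩ : ∃ m : Nat, n = m + 1 := ⟨n - 1, by omega⟩
  subst hsep
  have hA : (findSeries ((m+1 : Nat) : Int) "").toList = [] := by
    rw [pvA_toList]
    simp [PySem.Str.len_eq, PySem.List.slice]
  have hx : (PySem.Int.toStr (pvF 0).1).toList = ['0'] := by decide
  have hB : (findSeries_alt ((m+1 : Nat) : Int) "").toList ≠ [] := by
    rw [pvAlt_toList, List.range_succ_eq_map]
    simp only [List.map_cons]
    cases hr : List.map (fun k => (PySem.Int.toStr (pvF k).1).toList)
        (List.map Nat.succ (List.range m)) with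
    | nil => simp [PySem.Chars.join_singleton, hx]
    | cons y tl => rw [PySem.Chars.join_cons_cons]; simp [hx]
  intro h
  have h2 := congrArg String.toList h
  rw [hA] at h2
  exact hB h2.symm

-- ===== VERDICT (by name: the statement is the Claim_ definition above) =====
theorem findSeries_spec : Claim_unchanged_findSeries := by
  intro t s _ hpre hnd; exact findSeries_agree t s hpre hnd
theorem findSeries_changed : Claim_changed_findSeries := by
  unfold Claim_changed_findSeries; decide
theorem findSeries_tight : Claim_exact_findSeries := by
  intro t s _ _ hd; exact findSeries_diff t s hd
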